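-- pv_equiv track=rewrite | github.com/RedBlazerFlame/pcpo-2024-problem-files | adtech-guide-oval-hard/solutions/py1_tle.py | solve
-- ===== SOURCE A (Python) =====
-- def solve(N, xt, yt):
--     for y in range(N):
--         for x in range(N - y):
--             if(xt == x and yt == y): return "-"
--         for x in range(N - y, 3 * N + y):
--             if(xt == x and yt == y): return "#"
--         for x in range(3 * N + y, 4 * N):
--             if(xt == x and yt == y): return "-"
--
--     for y in range(N, 2 * N):
--         for x in range(N):
--             if(xt == x and yt == y): return "#"
--         for x in range(N, 3 * N):
--             if(xt == x and yt == y): return "-"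
--         for x in range(3 * N, 4 * N):
--             if(xt == x and yt == y): return "#"
--
--     for y in range(2 * N, 3 * N):
--         for x in range((y - 2 * N) + 1):
--             if(xt == x and yt == y): return "-"
--         for x in range((y - 2 * N) + 1, 4 * N - ((y - 2 * N) + 1)):
--             if(xt == x and yt == y): return "#"
--         for x in range(4 * N - ((y - 2 * N) + 1), 4 * N):
--             if(xt == x and yt == y): return "-"
-- ===== SOURCE B (Python) =====
-- def solve(N, xt, yt):
--     # O(1): classify yt into three horizontal bands and compare xt to the
--     # band's interval bounds instead of scanning every cell.
--     if N <= 0 or not (0 <= yt < 3 * N) or not (0 <= xt < 4 * N):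
--         return None
--     if yt < N:
--         return "#" if N - yt <= xt < 3 * N + yt else "-"
--     if yt < 2 * N:
--         return "-" if N <= xt < 3 * N else "#"
--     k = yt - 2 * N + 1
--     return "#" if k <= xt < 4 * N - k else "-"
-- ===== Notes on version B (the rewrite author's own statement) =====
-- stated objective: faster
-- what changed: Replaced the O(N^2) nested scan of every grid cell with an O(1) classification of yt into three bands and direct interval comparisons of xt against the band's computed bounds.
import Mathlib
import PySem

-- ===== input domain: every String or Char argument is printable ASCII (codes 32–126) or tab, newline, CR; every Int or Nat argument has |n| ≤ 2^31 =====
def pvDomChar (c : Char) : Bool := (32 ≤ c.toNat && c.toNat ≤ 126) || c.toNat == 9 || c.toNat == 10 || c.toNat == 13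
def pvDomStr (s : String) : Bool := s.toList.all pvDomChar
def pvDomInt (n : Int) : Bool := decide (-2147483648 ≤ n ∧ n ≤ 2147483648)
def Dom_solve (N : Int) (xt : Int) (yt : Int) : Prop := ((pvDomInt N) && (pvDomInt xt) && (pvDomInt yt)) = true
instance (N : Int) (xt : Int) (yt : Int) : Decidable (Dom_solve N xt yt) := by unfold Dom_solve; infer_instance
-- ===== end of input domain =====

-- B replaces A's O(N^2) cell-by-cell scan with O(1) band classification and interval bounds.

-- ===== PORT A =====
-- one inner loop 'for x in range(a,b): if xt == x and yt == y: return s'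
def scanRow (xt yt y : Int) (xs : List Int) (s : String) : Option String :=
  xs.findSome? (fun x => if xt = x ∧ yt = y then some s else none)

-- body of the first Python y-loop (early returns become Option.orElse)
def rowTop (N xt yt y : Int) : Option String :=
  (scanRow xt yt y (PySem.List.pyRange 0 (N - y) 1) "-").orElse (fun _ =>
  (scanRow xt yt y (PySem.List.pyRange (N - y) (3 * N + y) 1) "#").orElse (fun _ =>
   scanRow xt yt y (PySem.List.pyRange (3 * N + y) (4 * N) 1) "-"))

-- body of the second Python y-loop
def rowMid (N xt yt y : Int) : Option String :=
  (scanRow xt yt y (PySem.List.pyRange 0 N 1) "#").orElse (fun _ =>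
  (scanRow xt yt y (PySem.List.pyRange N (3 * N) 1) "-").orElse (fun _ =>
   scanRow xt yt y (PySem.List.pyRange (3 * N) (4 * N) 1) "#"))

-- body of the third Python y-loop
def rowBot (N xt yt y : Int) : Option String :=
  (scanRow xt yt y (PySem.List.pyRange 0 ((y - 2 * N) + 1) 1) "-").orElse (fun _ =>
  (scanRow xt yt y (PySem.List.pyRange ((y - 2 * N) + 1) (4 * N - ((y - 2 * N) + 1)) 1) "#").orElse (fun _ =>
   scanRow xt yt y (PySem.List.pyRange (4 * N - ((y - 2 * N) + 1)) (4 * N) 1) "-"))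

def solve (N : Int) (xt : Int) (yt : Int) : Option String :=
  ((PySem.List.pyRange 0 N 1).findSome? (rowTop N xt yt)).orElse (fun _ =>
  ((PySem.List.pyRange N (2 * N) 1).findSome? (rowMid N xt yt)).orElse (fun _ =>
   (PySem.List.pyRange (2 * N) (3 * N) 1).findSome? (rowBot N xt yt)))

-- ===== PORT B =====
def solve_alt (N : Int) (xt : Int) (yt : Int) : Option String :=
  if N ≤ 0 ∨ ¬(0 ≤ yt ∧ yt < 3 * N) ∨ ¬(0 ≤ xt ∧ xt < 4 * N) then none
  else if yt < N then
    (if N - yt ≤ xt ∧ xt < 3 * N + yt then some "#" else some "-")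
  else if yt < 2 * N then
    (if N ≤ xt ∧ xt < 3 * N then some "-" else some "#")
  else
    let k := yt - 2 * N + 1
    (if k ≤ xt ∧ xt < 4 * N - k then some "#" else some "-")

-- ===== PRECONDITION & SPEC =====
def Spec_solve (N : Int) (xt : Int) (yt : Int) (out : Option String) : Prop := out = solve_alt N xt yt
instance (N : Int) (xt : Int) (yt : Int) (out : Option String) : Decidable (Spec_solve N xt yt out) := by unfold Spec_solve; infer_instance

-- ===== CLAIM (what is proved, stated in full; the proofs are below) =====
def Claim_equal_solve : Prop := ∀ (N : Int) (xt : Int) (yt : Int), Dom_solve N xt yt → Spec_solve N xt yt (solve N xt yt)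

-- ===== LEMMAS AND PROOFS =====

lemma scanRow_range (xt yt y : Int) (s : String) (b : Int) : ∀ (a : Int),
    scanRow xt yt y (PySem.List.pyRange a b 1) s
      = if a ≤ xt ∧ xt < b ∧ yt = y then some s else none := by
  intro a
  induction h : (b - a).toNat generalizing a with
  | zero =>
    have hab : b ≤ a := by omega
    rw [PySem.List.pyRange_one_eq_nil hab]
    simp [scanRow]; omega
  | succ n ih =>
    have hab : a < b := by omega
    rw [PySem.List.pyRange_one_cons hab]
    by_cases hx : xt = a ∧ yt = y
    · simp only [scanRow, List.findSome?_cons, if_pos hx]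
      rw [if_pos ⟨by omega, by omega, hx.2⟩]
    · have hrec := ih (a + 1) (by omega)
      simp only [scanRow] at hrec
      simp only [scanRow, List.findSome?_cons, if_neg hx, hrec]
      by_cases hc : a + 1 ≤ xt ∧ xt < b ∧ yt = y
      · rw [if_pos hc, if_pos ⟨by omega, hc.2⟩]
      · rw [if_neg hc]
        rw [if_neg (fun hc2 => by
          rcases hc2 with ⟨h1, h2, h3⟩
          by_cases hxa : xt = a
          · exact hx ⟨hxa, h3⟩
          · exact hc ⟨by omega, h2, h3⟩)]

lemma findSome?_range_point (yt : Int) (f : Int → Option String)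
    (hf : ∀ y, yt ≠ y → f y = none) (b : Int) : ∀ (a : Int),
    (PySem.List.pyRange a b 1).findSome? f
      = if a ≤ yt ∧ yt < b then f yt else none := by
  intro a
  induction h : (b - a).toNat generalizing a with
  | zero =>
    have hab : b ≤ a := by omega
    rw [PySem.List.pyRange_one_eq_nil hab]
    simp; omega
  | succ n ih =>
    have hab : a < b := by omega
    rw [PySem.List.pyRange_one_cons hab, List.findSome?_cons]
    by_cases hy : yt = a
    · subst hy
      rw [if_pos ⟨le_refl _, hab⟩]
      cases hfy : f yt with
      | some v => simp
      | none =>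
        show List.findSome? f (PySem.List.pyRange (yt + 1) b 1) = none
        rw [ih (yt + 1) (by omega), if_neg (by omega)]
    · rw [hf a (by exact hy)]
      rw [ih (a + 1) (by omega)]
      split_ifs with h1 h2 h2 <;> first | rfl | omega

lemma rowTop_none (N xt yt : Int) : ∀ y, yt ≠ y → rowTop N xt yt y = none := by
  intro y hy
  simp [rowTop, scanRow_range, hy]

lemma rowMid_none (N xt yt : Int) : ∀ y, yt ≠ y → rowMid N xt yt y = none := by
  intro y hy
  simp [rowMid, scanRow_range, hy]

lemma rowBot_none (N xt yt : Int) : ∀ y, yt ≠ y → rowBot N xt yt y = none := by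
  intro y hy
  simp [rowBot, scanRow_range, hy]

-- ===== VERDICT (by name: the statement is the Claim_ definition above) =====
lemma some_orElse'' {α : Type} (a : α) (f : Unit → Option α) : (some a).orElse f = some a := rfl

lemma none_orElse'' {α : Type} (f : Unit → Option α) : (none : Option α).orElse f = f () := rfl

theorem solve_spec : Claim_equal_solve := by
  intro N xt yt _
  show solve N xt yt = solve_alt N xt yt
  have h1 := findSome?_range_point yt (rowTop N xt yt) (rowTop_none N xt yt) N 0
  have h2 := findSome?_range_point yt (rowMid N xt yt) (rowMid_none N xt yt) (2 * N) N
  have h3 := findSome?_range_point yt (rowBot N xt yt) (rowBot_none N xt yt) (3 * N) (2 * N)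
  simp only [solve, h1, h2, h3, rowTop, rowMid, rowBot, scanRow_range, solve_alt, and_true]
  by_cases hb1 : 0 ≤ yt ∧ yt < N
  · rw [if_pos hb1]
    by_cases ha1 : 0 ≤ xt ∧ xt < N - yt
    · rw [if_pos ha1]
      simp only [some_orElse'']
      rw [if_neg (show ¬(N ≤ 0 ∨ ¬(0 ≤ yt ∧ yt < 3 * N) ∨ ¬(0 ≤ xt ∧ xt < 4 * N)) by omega),
        if_pos hb1.2, if_neg (show ¬(N - yt ≤ xt ∧ xt < 3 * N + yt) by omega)]
    · rw [if_neg ha1]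
      simp only [none_orElse'']
      by_cases ha2 : N - yt ≤ xt ∧ xt < 3 * N + yt
      · rw [if_pos ha2]
        simp only [some_orElse'']
        rw [if_neg (show ¬(N ≤ 0 ∨ ¬(0 ≤ yt ∧ yt < 3 * N) ∨ ¬(0 ≤ xt ∧ xt < 4 * N)) by omega),
          if_pos hb1.2, if_pos ha2]
      · rw [if_neg ha2]
        simp only [none_orElse'']
        by_cases ha3 : 3 * N + yt ≤ xt ∧ xt < 4 * N
        · rw [if_pos ha3]
          simp only [some_orElse'']
          rw [if_neg (show ¬(N ≤ 0 ∨ ¬(0 ≤ yt ∧ yt < 3 * N) ∨ ¬(0 ≤ xt ∧ xt < 4 * N)) by omega),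
            if_pos hb1.2, if_neg ha2]
        · rw [if_neg ha3]
          simp only [none_orElse'']
          rw [if_neg (show ¬(N ≤ yt ∧ yt < 2 * N) by omega),
            if_neg (show ¬(2 * N ≤ yt ∧ yt < 3 * N) by omega)]
          simp only [none_orElse'']
          rw [if_pos (show N ≤ 0 ∨ ¬(0 ≤ yt ∧ yt < 3 * N) ∨ ¬(0 ≤ xt ∧ xt < 4 * N) by omega)]
  · rw [if_neg hb1]
    simp only [none_orElse'']
    by_cases hb2 : N ≤ yt ∧ yt < 2 * N
    · rw [if_pos hb2]
      by_cases hc1 : 0 ≤ xt ∧ xt < N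
      · rw [if_pos hc1]
        simp only [some_orElse'']
        rw [if_neg (show ¬(N ≤ 0 ∨ ¬(0 ≤ yt ∧ yt < 3 * N) ∨ ¬(0 ≤ xt ∧ xt < 4 * N)) by omega),
          if_neg (show ¬(yt < N) by omega), if_pos hb2.2,
          if_neg (show ¬(N ≤ xt ∧ xt < 3 * N) by omega)]
      · rw [if_neg hc1]
        simp only [none_orElse'']
        by_cases hc2 : N ≤ xt ∧ xt < 3 * N
        · rw [if_pos hc2]
          simp only [some_orElse'']
          rw [if_neg (show ¬(N ≤ 0 ∨ ¬(0 ≤ yt ∧ yt < 3 * N) ∨ ¬(0 ≤ xt ∧ xt < 4 * N)) by omega),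
            if_neg (show ¬(yt < N) by omega), if_pos hb2.2, if_pos hc2]
        · rw [if_neg hc2]
          simp only [none_orElse'']
          by_cases hc3 : 3 * N ≤ xt ∧ xt < 4 * N
          · rw [if_pos hc3]
            simp only [some_orElse'']
            rw [if_neg (show ¬(N ≤ 0 ∨ ¬(0 ≤ yt ∧ yt < 3 * N) ∨ ¬(0 ≤ xt ∧ xt < 4 * N)) by omega),
              if_neg (show ¬(yt < N) by omega), if_pos hb2.2, if_neg hc2]
          · rw [if_neg hc3]
            simp only [none_orElse'']
            rw [if_neg (show ¬(2 * N ≤ yt ∧ yt < 3 * N) by omega)]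
            rw [if_pos (show N ≤ 0 ∨ ¬(0 ≤ yt ∧ yt < 3 * N) ∨ ¬(0 ≤ xt ∧ xt < 4 * N) by omega)]
    · rw [if_neg hb2]
      simp only [none_orElse'']
      by_cases hb3 : 2 * N ≤ yt ∧ yt < 3 * N
      · rw [if_pos hb3]
        by_cases hd1 : 0 ≤ xt ∧ xt < yt - 2 * N + 1
        · rw [if_pos hd1]
          simp only [some_orElse'']
          rw [if_neg (show ¬(N ≤ 0 ∨ ¬(0 ≤ yt ∧ yt < 3 * N) ∨ ¬(0 ≤ xt ∧ xt < 4 * N)) by omega),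
            if_neg (show ¬(yt < N) by omega), if_neg (show ¬(yt < 2 * N) by omega),
            if_neg (show ¬(yt - 2 * N + 1 ≤ xt ∧ xt < 4 * N - (yt - 2 * N + 1)) by omega)]
        · rw [if_neg hd1]
          simp only [none_orElse'']
          by_cases hd2 : yt - 2 * N + 1 ≤ xt ∧ xt < 4 * N - (yt - 2 * N + 1)
          · rw [if_pos hd2]
            simp only [some_orElse'']
            rw [if_neg (show ¬(N ≤ 0 ∨ ¬(0 ≤ yt ∧ yt < 3 * N) ∨ ¬(0 ≤ xt ∧ xt < 4 * N)) by omega),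
              if_neg (show ¬(yt < N) by omega), if_neg (show ¬(yt < 2 * N) by omega),
              if_pos hd2]
          · rw [if_neg hd2]
            simp only [none_orElse'']
            by_cases hd3 : 4 * N - (yt - 2 * N + 1) ≤ xt ∧ xt < 4 * N
            · rw [if_pos hd3]
              rw [if_neg (show ¬(N ≤ 0 ∨ ¬(0 ≤ yt ∧ yt < 3 * N) ∨ ¬(0 ≤ xt ∧ xt < 4 * N)) by omega),
                if_neg (show ¬(yt < N) by omega), if_neg (show ¬(yt < 2 * N) by omega),
                if_neg hd2]
            · rw [if_neg hd3]
              rw [if_pos (show N ≤ 0 ∨ ¬(0 ≤ yt ∧ yt < 3 * N) ∨ ¬(0 ≤ xt ∧ xt < 4 * N) by omega)]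
      · rw [if_neg hb3]
        rw [if_pos (show N ≤ 0 ∨ ¬(0 ≤ yt ∧ yt < 3 * N) ∨ ¬(0 ≤ xt ∧ xt < 4 * N) by omega)]
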